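-- pv_equiv track=rewrite | github.com/QuangPhung15/CompetitiveProgramming | codeforce/800/Boy or Girl.py | solve
-- ===== SOURCE A (Python) =====
-- def solve(s):
-- 	char = set()
--
-- 	for c in s:
-- 		char.add(c)
--
-- 	if (len(char) % 2 == 1):
-- 		return "IGNORE HIM!"
-- 	else:
-- 		return "CHAT WITH HER!"
-- ===== SOURCE B (Python) =====
-- def solve(s):
--     d = 0
--     prev = None
--     for c in sorted(s):
--         if c != prev:
--             d += 1
--             prev = c
--     if d % 2 == 1:
--         return "IGNORE HIM!"
--     else:
--         return "CHAT WITH HER!"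
-- ===== Notes on version B (the rewrite author's own statement) =====
-- stated objective: alternative
-- what changed: Counts distinct characters by sorting and scanning for adjacent changes with a prev accumulator instead of building a hash set.
import Mathlib
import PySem

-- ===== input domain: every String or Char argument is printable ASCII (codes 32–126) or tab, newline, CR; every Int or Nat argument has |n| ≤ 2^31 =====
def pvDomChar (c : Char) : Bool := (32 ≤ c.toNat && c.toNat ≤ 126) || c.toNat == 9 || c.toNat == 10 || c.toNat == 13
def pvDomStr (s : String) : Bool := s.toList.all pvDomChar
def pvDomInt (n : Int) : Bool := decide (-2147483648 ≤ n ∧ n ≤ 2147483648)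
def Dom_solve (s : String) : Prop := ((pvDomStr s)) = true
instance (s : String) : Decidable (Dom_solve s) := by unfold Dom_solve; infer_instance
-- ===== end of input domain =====

-- B counts distinct characters by sorting and scanning for adjacent changes instead of building a hash set; same parity answer.

-- ===== PORT A =====
-- char = set(); for c in s: char.add(c); parity of len(char)
def solve (s : String) : String :=
  let char := s.toList.foldl PySem.Set.add PySem.Set.empty
  if PySem.Int.mod (PySem.Set.len char) 2 == 1 then "IGNORE HIM!" else "CHAT WITH HER!"

-- ===== PORT B =====
-- d = 0; prev = None; for c in sorted(s): if c != prev: d += 1; prev = c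
def altStep (st : Nat × Option Char) (c : Char) : Nat × Option Char :=
  if some c ≠ st.2 then (st.1 + 1, some c) else st

def solve_alt (s : String) : String :=
  let st := (PySem.List.sorted s.toList (fun c => c) false).foldl altStep (0, none)
  if st.1 % 2 == 1 then "IGNORE HIM!" else "CHAT WITH HER!"

-- ===== PRECONDITION & SPEC =====
def Spec_solve (s : String) (out : String) : Prop := out = solve_alt s
instance (s : String) (out : String) : Decidable (Spec_solve s out) := by unfold Spec_solve; infer_instance

-- ===== CLAIM (what is proved, stated in full; the proofs are below) =====
def Claim_equal_solve : Prop := ∀ (s : String), Dom_solve s → Spec_solve s (solve s)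

-- ===== LEMMAS AND PROOFS =====

-- On an order-sorted tail whose elements all dominate the current prev, B's scan adds exactly
-- the number of distinct elements other than prev.
theorem altStep_go (t : List Char) (ht : t.Pairwise (· ≤ ·)) :
    ∀ (d : Nat) (p : Char), (∀ x ∈ t, p ≤ x) →
      (t.foldl altStep (d, some p)).1 = d + (t.toFinset.erase p).card := by
  induction t with
  | nil => intro d p _; simp
  | cons c rest ih =>
    intro d p hp
    have hc : ∀ x ∈ rest, c ≤ x := by
      intro x hx; exact (List.pairwise_cons.mp ht).1 x hx
    have ih' := ih (List.pairwise_cons.mp ht).2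
    by_cases hcp : c = p
    · subst hcp
      have : altStep (d, some c) c = (d, some c) := by simp [altStep]
      rw [List.foldl_cons, this, ih' d c hc]
      simp [Finset.erase_insert_eq_erase]
    · have hpc : p < c := lt_of_le_of_ne (hp c (by simp)) (Ne.symm hcp)
      have : altStep (d, some p) c = (d + 1, some c) := by
        simp [altStep, fun h => hcp h]
      rw [List.foldl_cons, this, ih' (d + 1) c hc]
      have hpnot : p ∉ insert c rest.toFinset := by
        simp only [Finset.mem_insert, List.mem_toFinset]
        rintro (h | h)
        · exact hcp h.symm
        · exact absurd (hc p h) (not_le.mpr hpc)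
      have hcmem : c ∈ insert c rest.toFinset := Finset.mem_insert_self c rest.toFinset
      rw [List.toFinset_cons, Finset.erase_eq_of_notMem hpnot,
        ← Finset.card_erase_add_one hcmem, Finset.erase_insert_eq_erase]
      omega

-- B's full scan over a sorted list counts exactly the distinct elements.
theorem altStep_top (t : List Char) (ht : t.Pairwise (· ≤ ·)) :
    (t.foldl altStep (0, none)).1 = t.toFinset.card := by
  cases t with
  | nil => simp
  | cons c rest =>
    have hc : ∀ x ∈ rest, c ≤ x := by
      intro x hx; exact (List.pairwise_cons.mp ht).1 x hx
    have h1 : altStep (0, none) c = (1, some c) := by simp [altStep]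
    rw [List.foldl_cons, h1, altStep_go rest (List.pairwise_cons.mp ht).2 1 c hc]
    have hcmem : c ∈ insert c rest.toFinset := Finset.mem_insert_self c rest.toFinset
    rw [List.toFinset_cons, ← Finset.card_erase_add_one hcmem, Finset.erase_insert_eq_erase]
    omega

-- A's set has one element per distinct character.
theorem len_ofList (l : List Char) : (PySem.Set.ofList l).length = l.toFinset.card := by
  have hm : (PySem.Set.ofList l).toFinset = l.toFinset := by
    apply Finset.ext
    intro x
    simp [List.mem_toFinset, PySem.Set.mem_ofList]
  rw [← hm, List.toFinset_card_of_nodup (PySem.Set.nodup_ofList l)]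

theorem parity_cond (n : Nat) : (PySem.Int.mod (n : Int) 2 == 1) = (n % 2 == 1) := by
  rw [show ((2 : Int) = ((2 : Nat) : Int)) from rfl, PySem.Int.mod_natCast]
  rcases Nat.mod_two_eq_zero_or_one n with h | h <;> simp [h]

-- ===== VERDICT (by name: the statement is the Claim_ definition above) =====
theorem solve_spec : Claim_equal_solve := by
  intro s _
  show solve s = solve_alt s
  unfold solve solve_alt
  rw [show (List.foldl PySem.Set.add PySem.Set.empty s.toList) = PySem.Set.ofList s.toList
        from (PySem.Set.ofList_eq_foldl s.toList).symm]
  have hsort := altStep_top (PySem.List.sorted s.toList (fun c => c) false)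
      (PySem.List.sorted_pairwise s.toList (fun c => c))
  have hfin : (PySem.List.sorted s.toList (fun c => c) false).toFinset = s.toList.toFinset := by
    apply Finset.ext
    intro x
    simp [List.mem_toFinset, PySem.List.mem_sorted]
  simp only []
  rw [hsort, hfin]
  simp only [PySem.Set.len, len_ofList, parity_cond]
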